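-- pv_equiv track=rewrite | github.com/foss-for-synopsys-dwc-arc-processors/compiler-abi-extractor | abi-extract-info/lib/bitFieldTests.py | process_stage2
-- ===== SOURCE A (Python) =====
-- def process_stage2(entries):
--     # Find the most frequent content for each entry
--     for entry in entries:
--         occurrences = {}
--
--         # Count occurrences of each content
--         for c in entry["content"]:
--             if c in occurrences:
--                 occurrences[c] += 1
--             else:
--                 occurrences[c] = 1
--
--         # Get the most frequent content (or 'unknown' if no clear winner)
--         max_entry = max(occurrences, key=occurrences.get)
--         entry["content"] = max_entry or "unknown"
--
--     return entries
-- ===== SOURCE B (Python) =====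
-- def process_stage2(entries):
--     # Sort-and-group instead of counting: runs of the sorted content give each
--     # character's multiplicity; the winner is the first character of the original
--     # content whose multiplicity is maximal. Mutates the entry dicts in place, like A.
--     for entry in entries:
--         contents = entry["content"]
--         runs = _runs(sorted(contents))
--         best = max(n for _, n in runs)
--         best_chars = {c for c, n in runs if n == best}
--         winner = next(c for c in contents if c in best_chars)
--         entry["content"] = winner or "unknown"
--     return entries
--
--
-- def _runs(s):
--     # run-length encode a sorted list: peel off the equal prefix, recurse on the rest
--     if not s:
--         return []
--     i = 1
--     while i < len(s) and s[i] == s[0]: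
--         i += 1
--     return [(s[0], i)] + _runs(s[i:])
-- ===== Notes on version B (the rewrite author's own statement) =====
-- stated objective: alternative
-- what changed: B replaces A's per-entry frequency-dict counting loop and dict argmax by sort-and-group: run-length encode the sorted content to get each character's multiplicity, take the maximal run length, and pick the first character of the original content whose multiplicity is maximal.
import Mathlib
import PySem

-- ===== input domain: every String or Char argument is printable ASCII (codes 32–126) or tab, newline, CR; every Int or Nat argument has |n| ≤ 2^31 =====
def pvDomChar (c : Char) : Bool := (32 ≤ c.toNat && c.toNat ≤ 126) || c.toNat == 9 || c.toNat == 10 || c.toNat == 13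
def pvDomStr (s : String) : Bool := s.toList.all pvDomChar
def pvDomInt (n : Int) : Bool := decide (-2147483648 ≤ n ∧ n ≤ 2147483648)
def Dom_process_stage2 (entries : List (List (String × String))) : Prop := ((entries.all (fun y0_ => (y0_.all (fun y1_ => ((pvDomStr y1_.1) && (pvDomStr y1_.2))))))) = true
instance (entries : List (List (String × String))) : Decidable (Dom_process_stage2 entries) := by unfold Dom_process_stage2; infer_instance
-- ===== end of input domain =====

-- B replaces A's per-entry frequency-dict counting loop by sort-and-group: run-lengths of
-- the sorted content give the multiplicities, and the winner is the first character of the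
-- original content whose multiplicity is maximal (alternative decomposition, not faster).
-- Both Pythons mutate the entry dicts in place; the equivalence proved is about the return value.


-- ===== PORT A =====
-- literal port of A: per entry, build the occurrence dict by an explicit counting loop,
-- then max over the dict's keys keyed by their counts (occurrences.get; every key is
-- present, so getD k 0 returns exactly occurrences.get(k)); KeyError (missing "content")
-- and ValueError (max over an empty dict) are excluded by Pre_ and return the entry unchanged here.
def process_stage2 (entries : List (List (String × String))) : List (List (String × String)) :=
  entries.map (fun entry =>
    let d := PySem.Dict.ofList entry
    match d.get? "content" with
    | none => entry
    | some s =>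
      let occ : PySem.Dict Char Int :=
        s.toList.foldl
          (fun occ c =>
            if occ.contains c then occ.insert c (occ.getD c 0 + 1) else occ.insert c 1)
          PySem.Dict.empty
      match PySem.List.max? occ.keys (fun k => occ.getD k 0) with
      | none => entry
      | some m =>
        let ms := String.ofList [m]
        (d.insert "content" (if ms = "" then "unknown" else ms)).items)

-- ===== PORT B =====
-- literal port of Source B. _runs: peel the equal prefix (the while loop = takeWhile on the tail),
-- recurse on the rest; the raising corners (missing "content" key, empty content — excluded
-- by Pre_) return the entry unchanged here.
def pvRunsB : List Char → List (Char × Int)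
  | [] => []
  | c :: t =>
    (c, ((t.takeWhile (fun x => x == c)).length + 1 : Int))
      :: pvRunsB (t.dropWhile (fun x => x == c))
termination_by l => l.length
decreasing_by
  simp only [List.length_cons]
  exact Nat.lt_succ_of_le (List.length_dropWhile_le _ t)

def process_stage2_alt (entries : List (List (String × String))) : List (List (String × String)) :=
  entries.map (fun entry =>
    let d := PySem.Dict.ofList entry
    match d.get? "content" with
    | none => entry
    | some contents =>
      let runs := pvRunsB (PySem.List.sorted contents.toList (fun c => c) false)
      match PySem.List.max? (runs.map (fun p => p.2)) (fun n => n) with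
      | none => entry
      | some best =>
        let bestChars :=
          PySem.Set.ofList ((runs.filter (fun p => p.2 == best)).map (fun p => p.1))
        match contents.toList.find? (fun c => PySem.Set.contains bestChars c) with
        | none => entry
        | some w =>
          let ws := String.ofList [w]
          (d.insert "content" (if ws = "" then "unknown" else ws)).items)

-- ===== PRECONDITION & SPEC =====
-- Pre_ excludes exactly the inputs where Python A raises: an entry without a "content"
-- key (KeyError) or with empty content (ValueError from max over an empty dict); B raises there too.
def Pre_process_stage2 (entries : List (List (String × String))) : Prop :=
  ∀ e ∈ entries, (PySem.Dict.ofList e).getD "content" "" ≠ ""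
instance (entries : List (List (String × String))) : Decidable (Pre_process_stage2 entries) := by
  unfold Pre_process_stage2; infer_instance
def pvWitness_process_stage2 : (List (List (String × String))) :=
  [[("content", "aba"), ("label", "x")], [("content", "zz")]]
def Spec_process_stage2 (entries : List (List (String × String))) (out : List (List (String × String))) : Prop := out = process_stage2_alt entries
instance (entries : List (List (String × String))) (out : List (List (String × String))) : Decidable (Spec_process_stage2 entries out) := by unfold Spec_process_stage2; infer_instance

-- ===== CLAIM (what is proved, stated in full; the proofs are below) =====
def Claim_equal_process_stage2 : Prop := ∀ (entries : List (List (String × String))), Dom_process_stage2 entries → Pre_process_stage2 entries → Spec_process_stage2 entries (process_stage2 entries)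

-- ===== LEMMAS AND PROOFS =====

-- find? only looks at members
theorem find?_congr_mem {α : Type} (l : List α) (p q : α → Bool)
    (h : ∀ c ∈ l, p c = q c) : l.find? p = l.find? q := by
  induction l with
  | nil => rfl
  | cons x t ih =>
    simp only [List.find?_cons]
    rw [h x (List.mem_cons_self)]
    cases q x
    · exact ih (fun c hc => h c (List.mem_cons_of_mem _ hc))
    · rfl

-- the running-argmax step of max?, named so it can be rewritten
def mstep (f : Char → Int) (acc : Option Char) (x : Char) : Option Char :=
  match acc with | none => some x | some b => if f b < f x then some x else some b

theorem mstep_some (f : Char → Int) (m x : Char) :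
    mstep f (some m) x = if f m < f x then some x else some m := rfl

theorem max?_eq_foldl_mstep (f : Char → Int) (xs : List Char) :
    PySem.List.max? xs f = List.foldl (mstep f) none xs := by
  unfold PySem.List.max?; congr 1; funext acc x; cases acc <;> rfl

-- max? returns the FIRST element whose key dominates all keys
theorem foldl_mstep_eq_find? (f : Char → Int) : ∀ (t : List Char) (m : Char),
    List.foldl (mstep f) (some m) t
      = (m :: t).find? (fun c => (m :: t).all (fun y => decide (f y ≤ f c))) := by
  intro t
  induction t with
  | nil => intro m; simp
  | cons x t ih =>
    intro m
    simp only [List.foldl_cons, mstep]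
    by_cases hlt : f m < f x
    · rw [if_pos hlt, ih x]
      -- RHS: head m fails (f x ≤ f m is false); rest predicates agree on members
      have hm : ((m :: x :: t).all (fun y => decide (f y ≤ f m))) = false := by
        simp only [List.all_cons]
        have : decide (f x ≤ f m) = false := by simp [not_le.mpr hlt]
        simp [this]
      conv_rhs => rw [List.find?_cons]
      rw [hm]
      refine find?_congr_mem _ _ _ ?_
      intro c hc
      simp only [List.all_cons]
      by_cases hc1 : f x ≤ f c
      · have : decide (f m ≤ f c) = true := by simp [le_of_lt (lt_of_lt_of_le hlt hc1)]
        simp [this]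
      · simp [hc1]
    · rw [if_neg hlt, ih m]
      have hxm : f x ≤ f m := not_lt.mp hlt
      -- compare find? over (m :: t) with find? over (m :: x :: t)
      conv_lhs => rw [List.find?_cons]
      conv_rhs => rw [List.find?_cons]
      by_cases hPm : (m :: t).all (fun y => decide (f y ≤ f m))
      · have : ((m :: x :: t).all (fun y => decide (f y ≤ f m))) = true := by
          simp only [List.all_cons] at hPm ⊢
          simp only [Bool.and_eq_true] at hPm ⊢
          exact ⟨hPm.1, by simp [hxm], hPm.2⟩
        rw [hPm, this]
      · have hPm' : ((m :: x :: t).all (fun y => decide (f y ≤ f m))) = false := by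
          simp only [List.all_cons, Bool.and_eq_true] at hPm ⊢
          by_contra hcon
          simp only [Bool.not_eq_false, Bool.and_eq_true] at hcon
          exact hPm ⟨hcon.1, hcon.2.2⟩
        rw [Bool.not_eq_true] at hPm
        rw [hPm, hPm']
        -- now: find? over t of pred wrt (m::t)  =  find? over (x::t) of pred wrt (m::x::t)
        conv_rhs => rw [List.find?_cons]
        have hPx : ((m :: x :: t).all (fun y => decide (f y ≤ f x))) = false := by
          simp only [List.all_cons]
          by_cases hmx : f m ≤ f x
          · -- f m = f x; then all t ≤ f x would make all (m::t) ≤ f m true, contradicting hPm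
            have hme : f m = f x := le_antisymm hmx hxm
            by_contra hcon
            simp only [Bool.not_eq_false, Bool.and_eq_true] at hcon
            have : (m :: t).all (fun y => decide (f y ≤ f m)) = true := by
              simp only [List.all_cons, Bool.and_eq_true]
              refine ⟨by simp, ?_⟩
              simp only [List.all_eq_true] at hcon ⊢
              intro y hy
              have := hcon.2.2 y hy
              simp only [decide_eq_true_eq] at this ⊢
              omega
            rw [this] at hPm; exact absurd hPm (by simp)
          · simp [hmx]
        rw [hPx]
        refine find?_congr_mem _ _ _ ?_
        intro c hc
        simp only [List.all_cons]
        by_cases hxc : f x ≤ f c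
        · simp [hxc]
        · have : decide (f m ≤ f c) = false := by
            simp only [decide_eq_false_iff_not, not_le] at hxc ⊢
            omega
          simp [this, hxc]

theorem max?_eq_find?_all (f : Char → Int) (L : List Char) :
    PySem.List.max? L f = L.find? (fun c => L.all (fun y => decide (f y ≤ f c))) := by
  cases L with
  | nil => rfl
  | cons x t =>
    rw [max?_eq_foldl_mstep]
    simpa [mstep] using foldl_mstep_eq_find? f t x

-- first-occurrence dedup with a 'seen' accumulator; Set.ofList in this shape
def dedupGo (s : List Char) : List Char → List Char
  | [] => []
  | x :: t => if PySem.Set.contains s x then dedupGo s t else x :: dedupGo (s ++ [x]) t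

theorem foldl_add_eq_append_dedupGo : ∀ (L s : List Char),
    List.foldl PySem.Set.add s L = s ++ dedupGo s L := by
  intro L
  induction L with
  | nil => intro s; simp [dedupGo]
  | cons x t ih =>
    intro s
    simp only [List.foldl_cons, PySem.Set.add, dedupGo]
    cases h : PySem.Set.contains s x
    · simp only [Bool.false_eq_true, if_false, ih (s ++ [x]), List.append_assoc,
        List.singleton_append]
    · simp only [if_true, ih s]

-- dropping already-seen elements (all with key ≤ current best) does not change the running argmax
theorem maxfold_dedupGo (f : Char → Int) : ∀ (L s : List Char) (m : Char),
    (∀ y ∈ s, f y ≤ f m) →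
    List.foldl (mstep f) (some m) (dedupGo s L) = List.foldl (mstep f) (some m) L := by
  intro L
  induction L with
  | nil => intro s m _; rfl
  | cons x t ih =>
    intro s m hs
    simp only [dedupGo]
    cases hx : PySem.Set.contains s x
    · simp only [Bool.false_eq_true, if_false, List.foldl_cons, mstep_some]
      by_cases hlt : f m < f x
      · simp only [hlt, if_true]
        refine ih (s ++ [x]) x ?_
        intro y hy
        rcases List.mem_append.mp hy with h1 | h2
        · exact le_of_lt (lt_of_le_of_lt (hs y h1) hlt)
        · simp at h2; simp [h2]
      · simp only [hlt, if_false]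
        refine ih (s ++ [x]) m ?_
        intro y hy
        rcases List.mem_append.mp hy with h1 | h2
        · exact hs y h1
        · simp at h2; subst h2; exact not_lt.mp hlt
    · have hle : f x ≤ f m := hs x (by simpa using hx)
      simp only [if_true, List.foldl_cons, mstep_some, not_lt.mpr hle, if_false]
      exact ih s m hs

theorem max?_ofList (f : Char → Int) (L : List Char) :
    PySem.List.max? (PySem.Set.ofList L) f = PySem.List.max? L f := by
  cases L with
  | nil => rfl
  | cons c t =>
    have hof : PySem.Set.ofList (c :: t) = c :: dedupGo [c] t := by
      rw [PySem.Set.ofList_eq_foldl]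
      simp only [List.foldl_cons, PySem.Set.add]
      simpa [PySem.Set.empty] using foldl_add_eq_append_dedupGo t [c]
    rw [hof]
    simp only [max?_eq_foldl_mstep, List.foldl_cons]
    show List.foldl (mstep f) (mstep f none c) (dedupGo [c] t)
        = List.foldl (mstep f) (mstep f none c) t
    exact maxfold_dedupGo f t [c] c (by simp)

-- A's branchy counting loop builds Counter(L)
theorem occ_eq_counter (L : List Char) :
    L.foldl
      (fun occ c =>
        if occ.contains c then occ.insert c (occ.getD c 0 + 1) else occ.insert c 1)
      PySem.Dict.empty = PySem.Dict.counter L := by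
  rw [← PySem.Dict.foldl_insert_getD_add_one_eq_counter]
  refine PySem.List.foldl_congr_mem L _ _ PySem.Dict.empty ?_
  intro occ c _
  by_cases h : occ.contains c
  · simp [h]
  · simp [h, PySem.Dict.getD_of_not_contains occ 0 (by simpa using h)]

-- run-length spec on a sorted list: the runs are exactly the (member, count) pairs
theorem pvRunsB_spec : ∀ (l : List Char), l.Pairwise (· ≤ ·) →
    (∀ p ∈ pvRunsB l, p.1 ∈ l ∧ p.2 = (l.count p.1 : Int)) ∧
    (∀ c ∈ l, (c, (l.count c : Int)) ∈ pvRunsB l) := by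
  intro l
  induction l using pvRunsB.induct with
  | case1 => exact fun _ => ⟨by simp [pvRunsB], by simp⟩
  | case2 c t ih =>
    intro hp
    set grp := t.takeWhile (fun x => x == c) with hgrp
    set rest := t.dropWhile (fun x => x == c) with hrest
    have ht : t = grp ++ rest := (List.takeWhile_append_dropWhile).symm
    have hgrpc : ∀ x ∈ grp, x = c := by
      intro x hx
      have := List.mem_takeWhile_imp hx
      simpa using this
    have hrt : rest.Sublist t := List.dropWhile_sublist _
    have hrp : rest.Pairwise (· ≤ ·) := (hp.of_cons).sublist hrt
    have hcle : ∀ y ∈ t, c ≤ y := by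
      intro y hy; exact (List.pairwise_cons.mp hp).1 y hy
    have hrestgt : ∀ y ∈ rest, c < y := by
      intro y hy
      cases hr : rest with
      | nil => simp [hr] at hy
      | cons h0 r0 =>
        have hh0 : ¬ (h0 == c) = true := by
          have := List.head?_dropWhile_not (fun x => x == c) t
          rw [← hrest, hr] at this
          simpa using this
        have hh0c : h0 ≠ c := by simpa using hh0
        have hch0 : c < h0 :=
          lt_of_le_of_ne (hcle h0 (hrt.mem (by simp [hr]))) (Ne.symm hh0c)
        rw [hr] at hy
        rcases List.mem_cons.mp hy with rfl | hy2
        · exact hch0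
        · have : h0 ≤ y := by
            rw [hr] at hrp
            exact (List.pairwise_cons.mp hrp).1 y hy2
          exact lt_of_lt_of_le hch0 this
    have hcnotr : c ∉ rest := fun hc => lt_irrefl c (hrestgt c hc)
    have hcount_c : (c :: t).count c = grp.length + 1 := by
      rw [ht, List.count_cons_self, List.count_append]
      have h1 : grp.count c = grp.length := by
        rw [List.count_eq_length]
        intro x hx; exact ((hgrpc x hx) ▸ rfl)
      have h2 : rest.count c = 0 := List.count_eq_zero.mpr hcnotr
      omega
    have hcount_rest : ∀ y ∈ rest, (c :: t).count y = rest.count y := by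
      intro y hy
      have hyc : y ≠ c := fun h => absurd (h ▸ hrestgt y hy) (lt_irrefl c)
      rw [ht]
      simp only [List.count_cons, List.count_append, beq_iff_eq]
      have : (c = y) = False := by simp [Ne.symm hyc]
      simp [this]
      have : grp.count y = 0 := List.count_eq_zero.mpr (fun hyg => hyc (hgrpc y hyg))
      omega
    obtain ⟨ih1, ih2⟩ := ih hrp
    rw [show pvRunsB (c :: t) = (c, (grp.length + 1 : Int)) :: pvRunsB rest from by
      rw [pvRunsB]]
    constructor
    · intro p hp'
      rcases List.mem_cons.mp hp' with rfl | hp2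
      · refine ⟨List.mem_cons_self, ?_⟩
        simp only [hcount_c]; push_cast; ring
      · obtain ⟨hm, hv⟩ := ih1 p hp2
        refine ⟨List.mem_cons_of_mem _ ((ht ▸ List.mem_append_right grp hm)), ?_⟩
        rw [hv, hcount_rest p.1 hm]
    · intro x hx
      rcases List.mem_cons.mp hx with rfl | hx2
      · rw [hcount_c]
        have hc' : ((grp.length + 1 : Nat) : Int) = (grp.length : Int) + 1 := by push_cast; ring
        rw [hc']; exact List.mem_cons_self
      · rw [ht] at hx2
        rcases List.mem_append.mp hx2 with hg | hr
        · have := hgrpc x hg; subst this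
          rw [hcount_c]
          have hc' : ((grp.length + 1 : Nat) : Int) = (grp.length : Int) + 1 := by push_cast; ring
          rw [hc']; exact List.mem_cons_self
        · right
          rw [hcount_rest x hr]
          exact ih2 x hr

-- B's winner scan equals A's first-argmax scan
theorem bside_eq (L : List Char) (hL : L ≠ []) :
    (match PySem.List.max?
        ((pvRunsB (PySem.List.sorted L (fun c => c) false)).map (fun p => p.2)) (fun n => n) with
     | none => (none : Option Char)
     | some best =>
       L.find? (fun c => PySem.Set.contains
         (PySem.Set.ofList (((pvRunsB (PySem.List.sorted L (fun c => c) false)).filter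
            (fun p => p.2 == best)).map (fun p => p.1))) c))
    = L.find? (fun c => L.all (fun y => decide (((L.count y : Nat) : Int) ≤ ((L.count c : Nat) : Int)))) := by
  set s' := PySem.List.sorted L (fun c => c) false with hs'
  have hperm : s'.Perm L := PySem.List.sorted_perm L _ _
  have hpw : s'.Pairwise (· ≤ ·) := PySem.List.sorted_pairwise L (fun c => c) 
  obtain ⟨R1, R2⟩ := pvRunsB_spec s' hpw
  have hcnt : ∀ c, s'.count c = L.count c := fun c => hperm.count_eq c
  set runs := pvRunsB s' with hruns
  -- the outer max? is some
  cases hbest : PySem.List.max? (runs.map (fun p => p.2)) (fun n => n) with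
  | none =>
    exfalso
    rw [PySem.List.max?_eq_none_iff, List.map_eq_nil_iff] at hbest
    obtain ⟨x, hx⟩ := List.exists_mem_of_ne_nil L hL
    have := R2 x (hperm.mem_iff.mpr hx)
    rw [hbest] at this; exact absurd this (by simp)
  | some best =>
    have hmem := PySem.List.max?_mem hbest
    have hmax := PySem.List.max?_isMax hbest
    -- every count is ≤ best
    have hub : ∀ y ∈ L, ((L.count y : Nat) : Int) ≤ best := by
      intro y hy
      have h2 := R2 y (hperm.mem_iff.mpr hy)
      rw [hcnt] at h2
      exact hmax _ (List.mem_map.mpr ⟨_, h2, rfl⟩)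
    -- best is attained
    obtain ⟨p0, hp0, hp0v⟩ := List.mem_map.mp hmem
    obtain ⟨hp0m, hp0c⟩ := R1 p0 hp0
    have hex : ∃ c0 ∈ L, ((L.count c0 : Nat) : Int) = best := by
      exact ⟨p0.1, hperm.mem_iff.mp hp0m, by rw [← hcnt, ← hp0c, hp0v]⟩
    refine find?_congr_mem _ _ _ ?_
    intro c hc
    have hiff : (PySem.Set.contains
        (PySem.Set.ofList ((runs.filter (fun p => p.2 == best)).map (fun p => p.1))) c) = true
        ↔ ((L.count c : Nat) : Int) = best := by
      rw [PySem.Set.contains_iff, PySem.Set.mem_ofList]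
      constructor
      · intro h
        obtain ⟨p, hpf, hp1⟩ := List.mem_map.mp h
        obtain ⟨hpr, hpb⟩ := List.mem_filter.mp hpf
        obtain ⟨hm1, hv1⟩ := R1 p hpr
        rw [← hp1, ← hcnt, ← hv1]
        exact beq_iff_eq.mp hpb
      · intro h
        refine List.mem_map.mpr ⟨(c, (s'.count c : Int)), List.mem_filter.mpr ⟨R2 c (hperm.mem_iff.mpr hc), ?_⟩, rfl⟩
        rw [hcnt]; exact beq_iff_eq.mpr h
    have hiff2 : (L.all (fun y => decide (((L.count y : Nat) : Int) ≤ ((L.count c : Nat) : Int)))) = true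
        ↔ ((L.count c : Nat) : Int) = best := by
      rw [List.all_eq_true]
      constructor
      · intro h
        obtain ⟨c0, hc0, hc0b⟩ := hex
        have := h c0 hc0
        simp only [decide_eq_true_eq] at this
        have := hub c hc
        omega
      · intro h y hy
        simp only [decide_eq_true_eq]
        have := hub y hy
        omega
    rw [Bool.eq_iff_iff, hiff, hiff2]

-- A's dict argmax equals the same first-argmax scan
theorem aside_eq (L : List Char) :
    PySem.List.max?
      ((L.foldl
        (fun occ c =>
          if occ.contains c then occ.insert c (occ.getD c 0 + 1) else occ.insert c 1)
        PySem.Dict.empty : PySem.Dict Char Int).keys)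
      (fun k => (L.foldl
        (fun occ c =>
          if occ.contains c then occ.insert c (occ.getD c 0 + 1) else occ.insert c 1)
        PySem.Dict.empty : PySem.Dict Char Int).getD k 0)
    = L.find? (fun c => L.all (fun y => decide (((L.count y : Nat) : Int) ≤ ((L.count c : Nat) : Int)))) := by
  rw [occ_eq_counter, PySem.Dict.keys_counter]
  have hk : (fun k => (PySem.Dict.counter L).getD k 0)
      = fun k => ((L.count k : Nat) : Int) := by
    funext k; simp [PySem.Dict.getD_counter L k]
  rw [hk, max?_ofList, max?_eq_find?_all]

-- ===== VERDICT (by name: the statement is the Claim_ definition above) =====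
theorem process_stage2_spec : Claim_equal_process_stage2 := by
  unfold Claim_equal_process_stage2
  intro entries _ hpre
  unfold Spec_process_stage2 process_stage2 process_stage2_alt
  refine List.map_congr_left ?_
  intro entry hent
  have hpre' := hpre entry hent
  cases hget : (PySem.Dict.ofList entry).get? "content" with
  | none => simp [hget]
  | some s =>
    have hsne : s ≠ "" := by
      rw [PySem.Dict.getD_eq_get?_getD, hget] at hpre'
      simp at hpre'
      exact hpre'
    have hL : s.toList ≠ [] := by
      intro h
      exact hsne (String.toList_inj.mp (by simpa using h))
    simp only [hget]
    rw [aside_eq]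
    have bs := bside_eq s.toList hL
    cases hb : PySem.List.max?
        ((pvRunsB (PySem.List.sorted s.toList (fun c => c) false)).map (fun p => p.2))
        (fun n => n) with
    | none =>
      rw [hb] at bs
      rw [← bs]
    | some best =>
      rw [hb] at bs
      rw [← bs]
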